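-- pv_equiv track=rewrite | github.com/Aider-AI/aider | aider/coders/patch_coder.py | find_context_core
-- ===== SOURCE A (Python) =====
-- from typing import Dict, List, Optional, Tuple
--
-- def find_context_core(lines: List[str], context: List[str], start: int) -> Tuple[int, int]:
--     """Finds context block, returns start index and fuzz level."""
--     if not context:
--         return start, 0
--
--     # Exact match
--     for i in range(start, len(lines) - len(context) + 1):
--         if lines[i : i + len(context)] == context:
--             return i, 0
--     # Rstrip match
--     norm_context = [s.rstrip() for s in context]
--     for i in range(start, len(lines) - len(context) + 1):
--         if [s.rstrip() for s in lines[i : i + len(context)]] == norm_context: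
--             return i, 1  # Fuzz level 1
--     # Strip match
--     norm_context_strip = [s.strip() for s in context]
--     for i in range(start, len(lines) - len(context) + 1):
--         if [s.strip() for s in lines[i : i + len(context)]] == norm_context_strip:
--             return i, 100  # Fuzz level 100
--     return -1, 0
-- ===== SOURCE B (Python) =====
-- from typing import List, Tuple
--
-- def find_context_core(lines: List[str], context: List[str], start: int) -> Tuple[int, int]:
--     """Finds context block, returns start index and fuzz level (single pass)."""
--     if not context:
--         return start, 0
--     m = len(context)
--     ctx_r = [s.rstrip() for s in context]
--     ctx_s = [s.strip() for s in context]
--     lines_r = [s.rstrip() for s in lines]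
--     lines_s = [s.strip() for s in lines]
--     best_r = None
--     best_s = None
--     for i in range(start, len(lines) - m + 1):
--         if lines[i : i + m] == context:
--             return i, 0
--         if best_r is None and lines_r[i : i + m] == ctx_r:
--             best_r = i
--         if best_s is None and lines_s[i : i + m] == ctx_s:
--             best_s = i
--     if best_r is not None:
--         return best_r, 1
--     if best_s is not None:
--         return best_s, 100
--     return -1, 0
-- ===== Notes on version B (the rewrite author's own statement) =====
-- stated objective: alternative
-- what changed: Replaces A's three sequential scans (each re-stripping every window's lines) by a single pass over precomputed rstripped/stripped line lists that records the first match of each fuzz level; trades repeated stripping for two extra comparisons per position.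
import Mathlib
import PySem

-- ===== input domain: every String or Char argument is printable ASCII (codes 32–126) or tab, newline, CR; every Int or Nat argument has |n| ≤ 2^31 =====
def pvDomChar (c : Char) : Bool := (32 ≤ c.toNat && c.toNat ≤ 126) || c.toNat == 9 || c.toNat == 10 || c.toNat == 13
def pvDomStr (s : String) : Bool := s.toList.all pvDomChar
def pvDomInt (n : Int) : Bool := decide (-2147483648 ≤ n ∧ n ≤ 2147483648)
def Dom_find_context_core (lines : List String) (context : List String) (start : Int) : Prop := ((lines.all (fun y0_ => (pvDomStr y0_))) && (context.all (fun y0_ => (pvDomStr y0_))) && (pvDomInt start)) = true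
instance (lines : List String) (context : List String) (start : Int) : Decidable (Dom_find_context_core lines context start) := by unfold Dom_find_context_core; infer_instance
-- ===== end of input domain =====

-- B does one pass with precomputed normalized line lists instead of A's three re-stripping scans; same return value everywhere.

-- ===== PORT A =====
-- A: three sequential scans, each over range(start, len(lines)-len(context)+1), first with an
-- exact window comparison, then comparing rstripped windows, then stripped windows.
def find_context_core (lines : List String) (context : List String) (start : Int) : Int × Int :=
  if context = [] then (start, 0)
  else
    let m : Int := context.length
    let hi : Int := (lines.length : Int) - m + 1
    match (PySem.List.pyRange start hi 1).find?
        (fun i => PySem.List.slice lines (some i) (some (i + m)) == context) with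
    | some i => (i, 0)
    | none =>
      let norm_context := context.map PySem.Str.rstrip
      match (PySem.List.pyRange start hi 1).find?
          (fun i => (PySem.List.slice lines (some i) (some (i + m))).map PySem.Str.rstrip == norm_context) with
      | some i => (i, 1)
      | none =>
        let norm_context_strip := context.map PySem.Str.strip
        match (PySem.List.pyRange start hi 1).find?
            (fun i => (PySem.List.slice lines (some i) (some (i + m))).map PySem.Str.strip == norm_context_strip) with
        | some i => (i, 100)
        | none => (-1, 0)

-- ===== PORT B =====
-- B's loop: one pass, early return on exact match, accumulators for the first rstrip/strip matches.
def fccAltLoop (lines linesR linesS context ctxR ctxS : List String) (m : Int) :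
    List Int → Option Int → Option Int → Int × Int
  | [], bestR, bestS =>
    match bestR with
    | some j => (j, 1)
    | none =>
      match bestS with
      | some j => (j, 100)
      | none => (-1, 0)
  | i :: rest, bestR, bestS =>
    if PySem.List.slice lines (some i) (some (i + m)) == context then (i, 0)
    else
      fccAltLoop lines linesR linesS context ctxR ctxS m rest
        (if bestR.isNone && (PySem.List.slice linesR (some i) (some (i + m)) == ctxR) then some i else bestR)
        (if bestS.isNone && (PySem.List.slice linesS (some i) (some (i + m)) == ctxS) then some i else bestS)

def find_context_core_alt (lines : List String) (context : List String) (start : Int) : Int × Int :=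
  if context = [] then (start, 0)
  else
    let m : Int := context.length
    let ctxR := context.map PySem.Str.rstrip
    let ctxS := context.map PySem.Str.strip
    let linesR := lines.map PySem.Str.rstrip
    let linesS := lines.map PySem.Str.strip
    fccAltLoop lines linesR linesS context ctxR ctxS m
      (PySem.List.pyRange start ((lines.length : Int) - m + 1) 1) none none

-- ===== PRECONDITION & SPEC =====
def Spec_find_context_core (lines : List String) (context : List String) (start : Int) (out : Int × Int) : Prop := out = find_context_core_alt lines context start
instance (lines : List String) (context : List String) (start : Int) (out : Int × Int) : Decidable (Spec_find_context_core lines context start out) := by unfold Spec_find_context_core; infer_instance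

-- ===== CLAIM (what is proved, stated in full; the proofs are below) =====
def Claim_equal_find_context_core : Prop := ∀ (lines : List String) (context : List String) (start : Int), Dom_find_context_core lines context start → Spec_find_context_core lines context start (find_context_core lines context start)

-- ===== LEMMAS AND PROOFS =====

-- map commutes with slice (slice is clamped drop/take, both of which commute with map)
theorem fcc_map_slice {α β : Type} (f : α → β) (xs : List α) (a b : Int) :
    (PySem.List.slice xs (some a) (some b)).map f = PySem.List.slice (xs.map f) (some a) (some b) := by
  simp [PySem.List.slice, PySem.List.clampIdx]

-- the loop invariant: fccAltLoop on an index list equals A's three-find cascade, with the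
-- accumulators taking priority over finds in the remaining list
theorem fccAltLoop_invariant (lines linesR linesS context ctxR ctxS : List String) (m : Int)
    (l : List Int) (bestR bestS : Option Int) :
    fccAltLoop lines linesR linesS context ctxR ctxS m l bestR bestS =
      match l.find? (fun i => PySem.List.slice lines (some i) (some (i + m)) == context) with
      | some i => (i, 0)
      | none =>
        match bestR.orElse (fun _ => l.find? (fun i => PySem.List.slice linesR (some i) (some (i + m)) == ctxR)) with
        | some j => (j, 1)
        | none =>
          match bestS.orElse (fun _ => l.find? (fun i => PySem.List.slice linesS (some i) (some (i + m)) == ctxS)) with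
          | some j => (j, 100)
          | none => (-1, 0) := by
  induction l generalizing bestR bestS with
  | nil => cases bestR <;> cases bestS <;> simp [fccAltLoop, Option.orElse]
  | cons i rest ih =>
    by_cases hx : (PySem.List.slice lines (some i) (some (i + m)) == context) = true
    · simp [fccAltLoop, hx, List.find?]
    · have hx' : (PySem.List.slice lines (some i) (some (i + m)) == context) = false :=
        Bool.eq_false_iff.mpr hx
      rw [show fccAltLoop lines linesR linesS context ctxR ctxS m (i :: rest) bestR bestS =
          fccAltLoop lines linesR linesS context ctxR ctxS m rest
            (if bestR.isNone && (PySem.List.slice linesR (some i) (some (i + m)) == ctxR) then some i else bestR)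
            (if bestS.isNone && (PySem.List.slice linesS (some i) (some (i + m)) == ctxS) then some i else bestS)
          from by simp [fccAltLoop, hx']]
      rw [ih]
      have hfind : (i :: rest).find? (fun i => PySem.List.slice lines (some i) (some (i + m)) == context)
          = rest.find? (fun i => PySem.List.slice lines (some i) (some (i + m)) == context) := by
        simp [List.find?, hx']
      rw [hfind]
      cases hf : rest.find? (fun i => PySem.List.slice lines (some i) (some (i + m)) == context) with
      | some j => rfl
      | none =>
        have hR : ((if bestR.isNone && (PySem.List.slice linesR (some i) (some (i + m)) == ctxR) then some i else bestR).orElse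
              (fun _ => rest.find? (fun i => PySem.List.slice linesR (some i) (some (i + m)) == ctxR)))
            = (bestR.orElse (fun _ => (i :: rest).find? (fun i => PySem.List.slice linesR (some i) (some (i + m)) == ctxR))) := by
          cases bestR with
          | some j => simp [Option.orElse]
          | none =>
            cases hr : (PySem.List.slice linesR (some i) (some (i + m)) == ctxR) <;>
              simp [List.find?, hr, Option.orElse]
        have hS : ((if bestS.isNone && (PySem.List.slice linesS (some i) (some (i + m)) == ctxS) then some i else bestS).orElse
              (fun _ => rest.find? (fun i => PySem.List.slice linesS (some i) (some (i + m)) == ctxS)))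
            = (bestS.orElse (fun _ => (i :: rest).find? (fun i => PySem.List.slice linesS (some i) (some (i + m)) == ctxS))) := by
          cases bestS with
          | some j => simp [Option.orElse]
          | none =>
            cases hs : (PySem.List.slice linesS (some i) (some (i + m)) == ctxS) <;>
              simp [List.find?, hs, Option.orElse]
        rw [hR, hS]

-- ===== VERDICT (by name: the statement is the Claim_ definition above) =====
theorem find_context_core_spec : Claim_equal_find_context_core := by
  intro lines context start _
  unfold Spec_find_context_core find_context_core find_context_core_alt
  by_cases hc : context = []
  · simp [hc]
  · simp only [hc, if_false]
    rw [fccAltLoop_invariant]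
    have hcongr : ∀ (f : String → String),
        (PySem.List.pyRange start ((lines.length : Int) - (context.length : Int) + 1) 1).find?
            (fun i => (PySem.List.slice lines (some i) (some (i + (context.length : Int)))).map f == context.map f)
          = (PySem.List.pyRange start ((lines.length : Int) - (context.length : Int) + 1) 1).find?
            (fun i => PySem.List.slice (lines.map f) (some i) (some (i + (context.length : Int))) == context.map f) := by
      intro f
      congr 1
      funext i
      rw [fcc_map_slice]
    simp only [Option.orElse]
    rw [hcongr PySem.Str.rstrip, hcongr PySem.Str.strip]
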